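-- pv_equiv track=rewrite | github.com/tcztzy/xcc | src/xcc/lexer.py | _replace_trigraphs
-- ===== SOURCE A (Python) =====
-- TRIGRAPHS = {
--     "=": "#",
--     "/": "\\",
--     "'": "^",
--     "(": "[",
--     ")": "]",
--     "!": "|",
--     "<": "{",
--     ">": "}",
--     "-": "~",
-- }
--
-- def _replace_trigraphs(source: str) -> str:
--     out: list[str] = []
--     i = 0
--     length = len(source)
--     while i < length:
--         if (
--             source[i] == "?"
--             and i + 2 < length
--             and source[i + 1] == "?"
--             and source[i + 2] in TRIGRAPHS
--         ):
--             out.append(TRIGRAPHS[source[i + 2]])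
--             i += 3
--             continue
--         out.append(source[i])
--         i += 1
--     return "".join(out)
-- ===== SOURCE B (Python) =====
-- TRIGRAPHS = {
--     "=": "#",
--     "/": "\\",
--     "'": "^",
--     "(": "[",
--     ")": "]",
--     "!": "|",
--     "<": "{",
--     ">": "}",
--     "-": "~",
-- }
--
--
-- def _replace_trigraphs(source: str) -> str:
--     # One-pass streaming state machine: q counts the pending trailing '?'
--     # characters (capped at 2); no index arithmetic or lookahead needed.
--     out: list[str] = []
--     q = 0
--     for ch in source:
--         if ch == "?":
--             if q == 2:
--                 out.append("?")
--             else: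
--                 q += 1
--         elif q == 2 and ch in TRIGRAPHS:
--             out.append(TRIGRAPHS[ch])
--             q = 0
--         else:
--             out.append("?" * q)
--             out.append(ch)
--             q = 0
--     out.append("?" * q)
--     return "".join(out)
-- ===== Notes on version B (the rewrite author's own statement) =====
-- stated objective: alternative
-- what changed: Replaced A's index-based scanning loop with two-character lookahead into the source by a single forward pass driven by a small state machine that only remembers how many pending question-mark characters (capped at 2) precede the current position.
import Mathlib
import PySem

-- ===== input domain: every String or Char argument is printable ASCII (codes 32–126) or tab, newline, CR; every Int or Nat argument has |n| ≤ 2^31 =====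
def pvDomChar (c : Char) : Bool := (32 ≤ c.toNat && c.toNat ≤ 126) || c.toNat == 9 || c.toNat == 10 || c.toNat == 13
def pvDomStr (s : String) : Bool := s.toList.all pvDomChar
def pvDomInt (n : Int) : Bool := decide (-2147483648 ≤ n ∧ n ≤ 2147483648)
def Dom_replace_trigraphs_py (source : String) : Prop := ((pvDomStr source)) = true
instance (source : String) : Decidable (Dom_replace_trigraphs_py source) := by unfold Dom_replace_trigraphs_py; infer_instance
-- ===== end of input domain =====

-- B replaces A's index-with-lookahead scanning loop by a one-pass streaming
-- state machine that only remembers how many '?' are pending (alternative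
-- decomposition, same cost).

-- ===== PORT A =====
-- TRIGRAPHS: the module-level dict (1-char keys/values, kept as Chars)
def TRIGRAPHS_py : PySem.Dict Char Char :=
  PySem.Dict.ofList [('=', '#'), ('/', '\\'), ('\'', '^'), ('(', '['), (')', ']'),
   ('!', '|'), ('<', '{'), ('>', '}'), ('-', '~')]

-- A's while loop: index i, accumulator out (list of appended chars)
def replaceTrigraphsLoop (cs : List Char) (i : Nat) (out : List Char) : List Char :=
  if h : i < cs.length then
    if cs[i] = '?' ∧ i + 2 < cs.length ∧ cs.getD (i + 1) ' ' = '?' ∧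
        (TRIGRAPHS_py.get? (cs.getD (i + 2) ' ')).isSome then
      replaceTrigraphsLoop cs (i + 3) (out ++ [TRIGRAPHS_py.getD (cs.getD (i + 2) ' ') ' '])
    else
      replaceTrigraphsLoop cs (i + 1) (out ++ [cs[i]])
  else out
termination_by cs.length - i

def replace_trigraphs_py (source : String) : String :=
  String.ofList (replaceTrigraphsLoop source.toList 0 [])

-- ===== PORT B =====
-- Source B's loop body: state (out, q); q = number of pending '?' (≤ 2)
def bStep (st : List Char × Nat) (ch : Char) : List Char × Nat :=
  if ch = '?' then
    if st.2 = 2 then (st.1 ++ ['?'], 2) else (st.1, st.2 + 1)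
  else if st.2 = 2 ∧ (TRIGRAPHS_py.get? ch).isSome then
    (st.1 ++ [TRIGRAPHS_py.getD ch ' '], 0)
  else
    (st.1 ++ List.replicate st.2 '?' ++ [ch], 0)

def replace_trigraphs_py_alt (source : String) : String :=
  let st := source.toList.foldl bStep ([], 0)
  String.ofList (st.1 ++ List.replicate st.2 '?')

-- ===== PRECONDITION & SPEC =====
def Spec_replace_trigraphs_py (source : String) (out : String) : Prop := out = replace_trigraphs_py_alt source
instance (source : String) (out : String) : Decidable (Spec_replace_trigraphs_py source out) := by unfold Spec_replace_trigraphs_py; infer_instance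

-- ===== CLAIM (what is proved, stated in full; the proofs are below) =====
def Claim_equal_replace_trigraphs_py : Prop := ∀ (source : String), Dom_replace_trigraphs_py source → Spec_replace_trigraphs_py source (replace_trigraphs_py source)

-- ===== LEMMAS AND PROOFS =====

-- canonical recursive description of the trigraph replacement, used to relate both ports
def canonTri : List Char → List Char
  | [] => []
  | [a] => [a]
  | [a, b] => [a, b]
  | a :: b :: c :: r =>
    if a = '?' ∧ b = '?' ∧ (TRIGRAPHS_py.get? c).isSome then
      TRIGRAPHS_py.getD c ' ' :: canonTri r
    else
      a :: canonTri (b :: c :: r)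

theorem replaceTrigraphsLoop_eq_canon (cs : List Char) (i : Nat) (out : List Char) :
    replaceTrigraphsLoop cs i out = out ++ canonTri (cs.drop i) := by
  induction hn : cs.length - i using Nat.strong_induction_on generalizing i out with
  | _ n ih =>
  rw [replaceTrigraphsLoop]
  by_cases h : i < cs.length
  · simp only [h, dif_pos]
    have hdrop : cs.drop i = cs[i] :: cs.drop (i + 1) := List.drop_eq_getElem_cons h
    by_cases hm : cs[i] = '?' ∧ i + 2 < cs.length ∧ cs.getD (i + 1) ' ' = '?' ∧
        (TRIGRAPHS_py.get? (cs.getD (i + 2) ' ')).isSome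
    · rw [if_pos hm, ih (cs.length - (i + 3)) (by omega) (i + 3) _ rfl]
      obtain ⟨h0, h2, h1, hk⟩ := hm
      have h1' : i + 1 < cs.length := by omega
      have hd1 : cs.drop (i + 1) = cs[i + 1] :: cs.drop (i + 2) := List.drop_eq_getElem_cons h1'
      have hd2 : cs.drop (i + 2) = cs[i + 2] :: cs.drop (i + 3) := List.drop_eq_getElem_cons h2
      rw [List.getD_eq_getElem _ _ h1'] at h1
      rw [List.getD_eq_getElem _ _ h2] at hk ⊢
      rw [hdrop, hd1, hd2, canonTri, if_pos ⟨h0, h1, hk⟩]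
      simp
    · rw [if_neg hm, ih (cs.length - (i + 1)) (by omega) (i + 1) _ rfl, hdrop]
      have hcons : canonTri (cs[i] :: cs.drop (i + 1)) = cs[i] :: canonTri (cs.drop (i + 1)) := by
        by_cases hlen : i + 2 < cs.length
        · have h1' : i + 1 < cs.length := by omega
          have hd1 : cs.drop (i + 1) = cs[i + 1] :: cs.drop (i + 2) := List.drop_eq_getElem_cons h1'
          have hd2 : cs.drop (i + 2) = cs[i + 2] :: cs.drop (i + 3) := List.drop_eq_getElem_cons hlen
          rw [hd1, hd2, canonTri, if_neg, ← hd2, ← hd1]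
          intro ⟨ha0, hb0, hk0⟩
          exact hm ⟨ha0, hlen, by rw [List.getD_eq_getElem _ _ h1']; exact hb0,
            by rw [List.getD_eq_getElem _ _ hlen]; exact hk0⟩
        · have : (cs.drop (i + 1)).length ≤ 1 := by
            simp only [List.length_drop]; omega
          rcases hd : cs.drop (i + 1) with _ | ⟨b, _ | ⟨c, r⟩⟩
          · rfl
          · rfl
          · rw [hd] at this; simp at this
      rw [hcons]; simp
  · rw [dif_neg h, List.drop_eq_nil_of_le (by omega)]
    simp [canonTri]

theorem canonTri_cons_ne {ch : Char} (h : ch ≠ '?') (t : List Char) :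
    canonTri (ch :: t) = ch :: canonTri t := by
  match t with
  | [] => rfl
  | [b] => rfl
  | b :: c :: r =>
    rw [canonTri, if_neg]
    rintro ⟨ha, -, -⟩
    exact h ha

theorem canonTri_one_q {ch : Char} (h : ch ≠ '?') (t : List Char) :
    canonTri ('?' :: ch :: t) = '?' :: ch :: canonTri t := by
  match t with
  | [] => rfl
  | c :: r =>
    rw [canonTri, if_neg, canonTri_cons_ne h]
    rintro ⟨-, hb, -⟩
    exact h hb

theorem canonTri_two_q {ch : Char} (h : ch ≠ '?')
    (hk : ¬ (TRIGRAPHS_py.get? ch).isSome = true) (t : List Char) :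
    canonTri ('?' :: '?' :: ch :: t) = '?' :: '?' :: ch :: canonTri t := by
  rw [canonTri, if_neg, canonTri_one_q h]
  rintro ⟨-, -, hkk⟩
  exact hk hkk

theorem bFold_eq_canon (t : List Char) (out : List Char) (q : Nat) (hq : q ≤ 2) :
    (t.foldl bStep (out, q)).1 ++ List.replicate (t.foldl bStep (out, q)).2 '?'
      = out ++ canonTri (List.replicate q '?' ++ t) := by
  induction t generalizing out q with
  | nil => interval_cases q <;> simp [canonTri]
  | cons ch t ih =>
    rw [List.foldl_cons]
    by_cases hch : ch = '?'
    · subst hch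
      by_cases h2 : q = 2
      · subst h2
        have hb : bStep (out, 2) '?' = (out ++ ['?'], 2) := by simp [bStep]
        rw [hb, ih _ _ (by omega)]
        show _ = out ++ canonTri ('?' :: '?' :: '?' :: t)
        rw [canonTri, if_neg]
        · simp [List.replicate_succ]
        · rintro ⟨-, -, hkk⟩
          exact absurd hkk (by decide)
      · have hb : bStep (out, q) '?' = (out, q + 1) := by simp [bStep, h2]
        rw [hb, ih _ _ (by omega)]
        have : List.replicate (q + 1) '?' ++ t = List.replicate q '?' ++ '?' :: t := by
          rw [List.replicate_succ', List.append_assoc]; rfl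
        rw [this]
    · by_cases hk : q = 2 ∧ (TRIGRAPHS_py.get? ch).isSome = true
      · obtain ⟨h2, hkk⟩ := hk
        subst h2
        have hb : bStep (out, 2) ch = (out ++ [TRIGRAPHS_py.getD ch ' '], 0) := by
          simp [bStep, hch, hkk]
        rw [hb, ih _ _ (by omega)]
        show _ = out ++ canonTri ('?' :: '?' :: ch :: t)
        rw [canonTri, if_pos ⟨rfl, rfl, hkk⟩]
        simp
      · have hb : bStep (out, q) ch = (out ++ List.replicate q '?' ++ [ch], 0) := by
          simp only [bStep, if_neg hch, if_neg hk]
        rw [hb, ih _ _ (by omega)]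
        interval_cases q
        · simp [canonTri_cons_ne hch]
        · simp [canonTri_one_q hch]
        · have hknot : ¬ (TRIGRAPHS_py.get? ch).isSome = true := fun hc => hk ⟨rfl, hc⟩
          simp [canonTri_two_q hch hknot, List.replicate_succ]

-- ===== VERDICT (by name: the statement is the Claim_ definition above) =====
theorem replace_trigraphs_py_spec : Claim_equal_replace_trigraphs_py := by
  intro source _
  unfold Spec_replace_trigraphs_py replace_trigraphs_py replace_trigraphs_py_alt
  rw [replaceTrigraphsLoop_eq_canon]
  show _ = String.ofList ((source.toList.foldl bStep ([], 0)).1 ++ List.replicate (source.toList.foldl bStep ([], 0)).2 '?')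
  rw [bFold_eq_canon _ _ 0 (by omega)]
  simp
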